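-- pv_equiv track=rewrite | github.com/viking-sudo-rm/dfa-extractor | languages.py | trace_acceptance
-- ===== SOURCE A (Python) =====
-- def trace_acceptance(string):
--     statuses = []
--     even_a = True
--     even_b = True
--     for token in string:
--         status = int(even_a and even_b)
--         statuses.append(status)
--
--         if token == "a":
--             even_a = not even_a
--         else:
--             even_b = not even_b
--
--     status = int(even_a and even_b)
--     statuses.append(status)
--     return statuses
-- ===== SOURCE B (Python) =====
-- def trace_acceptance(string):
--     # prefix counts of 'a': both parities even iff prefix length and a-count are both even
--     prefix_a = [0]
--     acc = 0
--     for token in string: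
--         acc += token == "a"
--         prefix_a.append(acc)
--     return [int(i % 2 == 0 and c % 2 == 0) for i, c in enumerate(prefix_a)]
-- ===== Notes on version B (the rewrite author's own statement) =====
-- stated objective: alternative
-- what changed: Replaces the two-boolean DFA state loop by a prefix a-count list plus an arithmetic characterisation: status is 1 iff the prefix length and its a-count are both even.
import Mathlib
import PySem

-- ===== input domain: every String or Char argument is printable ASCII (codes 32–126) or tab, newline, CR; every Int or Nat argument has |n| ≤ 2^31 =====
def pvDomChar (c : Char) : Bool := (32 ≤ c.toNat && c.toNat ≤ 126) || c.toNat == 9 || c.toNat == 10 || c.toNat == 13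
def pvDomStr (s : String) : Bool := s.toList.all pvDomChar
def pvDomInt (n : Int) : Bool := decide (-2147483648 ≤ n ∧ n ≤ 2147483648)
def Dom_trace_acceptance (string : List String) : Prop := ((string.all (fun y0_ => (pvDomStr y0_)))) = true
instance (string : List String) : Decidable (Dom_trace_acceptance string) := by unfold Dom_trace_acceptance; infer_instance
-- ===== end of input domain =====

-- ===== PORT A =====
def traceLoopA : List String → Bool → Bool → List Int
  | [], even_a, even_b => [if even_a && even_b then 1 else 0]
  | token :: rest, even_a, even_b =>
    (if even_a && even_b then (1 : Int) else 0) ::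
      (if token = "a" then traceLoopA rest (!even_a) even_b
       else traceLoopA rest even_a (!even_b))

def trace_acceptance (string : List String) : List Int :=
  traceLoopA string true true

-- ===== PORT B =====
def prefixA : List String → Int → List Int
  | [], _ => []
  | token :: rest, acc =>
    let acc' := acc + (if token = "a" then 1 else 0)
    acc' :: prefixA rest acc'

def trace_acceptance_alt (string : List String) : List Int :=
  (PySem.List.enumerate ((0 : Int) :: prefixA string 0)).map
    (fun p => if p.1 % 2 == 0 && p.2 % 2 == 0 then (1 : Int) else 0)

-- ===== PRECONDITION & SPEC =====
def Spec_trace_acceptance (string : List String) (out : List Int) : Prop := out = trace_acceptance_alt string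
instance (string : List String) (out : List Int) : Decidable (Spec_trace_acceptance string out) := by unfold Spec_trace_acceptance; infer_instance

-- ===== CLAIM (what is proved, stated in full; the proofs are below) =====
def Claim_equal_trace_acceptance : Prop := ∀ (string : List String), Dom_trace_acceptance string → Spec_trace_acceptance string (trace_acceptance string)

-- ===== LEMMAS AND PROOFS =====

theorem flipParity (c : Int) : (!decide (c % 2 = 0)) = decide ((c + 1) % 2 = 0) := by
  rcases Int.emod_two_eq_zero_or_one c with hc | hc <;> simp [hc] <;> omega

def stIC (i c : Int) : Int := if i % 2 == 0 && c % 2 == 0 then 1 else 0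

def specList : List String → Int → Int → List Int
  | [], i, c => [stIC i c]
  | token :: rest, i, c =>
    stIC i c :: specList rest (i + 1) (c + (if token = "a" then 1 else 0))

theorem traceLoopA_eq_specList (s : List String) (i c : Int)
    : ∀ (ea eb : Bool), ea = decide (c % 2 = 0) → eb = decide ((i - c) % 2 = 0) →
      traceLoopA s ea eb = specList s i c := by
  induction s generalizing i c with
  | nil =>
    intro ea eb hea heb
    subst hea heb
    simp only [traceLoopA, specList, stIC]
    congr 1
    rcases Int.emod_two_eq_zero_or_one c with hc | hc <;>
      rcases Int.emod_two_eq_zero_or_one i with hi | hi <;>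
      simp [hc, hi] <;> omega
  | cons t rest ih =>
    intro ea eb hea heb
    subst hea heb
    simp only [traceLoopA, specList]
    congr 1
    · simp only [stIC]
      congr 1
      rcases Int.emod_two_eq_zero_or_one c with hc | hc <;>
        rcases Int.emod_two_eq_zero_or_one i with hi | hi <;>
        simp [hc, hi] <;> omega
    · by_cases ht : t = "a"
      · simp only [ht, if_pos]
        apply ih
        · exact flipParity c
        · congr 2; omega
      · simp only [if_neg ht]
        apply ih
        · simp
        · rw [show i + 1 - (c + 0) = (i - c) + 1 by ring]; exact flipParity (i - c)

theorem enumerate_prefixA_eq_specList (s : List String) (i c : Int) :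
    (PySem.List.enumerate (c :: prefixA s c) i).map
      (fun p => if p.1 % 2 == 0 && p.2 % 2 == 0 then (1 : Int) else 0)
    = specList s i c := by
  induction s generalizing i c with
  | nil => simp [prefixA, specList, PySem.List.enumerate_cons, PySem.List.enumerate_nil, stIC]
  | cons t rest ih =>
    simp only [prefixA, specList, PySem.List.enumerate_cons, List.map_cons, stIC]
    congr 1
    exact ih (i + 1) (c + (if t = "a" then 1 else 0))

-- ===== VERDICT (by name: the statement is the Claim_ definition above) =====
theorem trace_acceptance_spec : Claim_equal_trace_acceptance := by
  intro s _
  unfold Spec_trace_acceptance trace_acceptance trace_acceptance_alt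
  rw [enumerate_prefixA_eq_specList s 0 0]
  exact traceLoopA_eq_specList s 0 0 true true (by decide) (by decide)
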